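-- pv_equiv track=rewrite | github.com/HuongGiangN/Portal-Maze | portal.py | find_positions
-- ===== SOURCE A (Python) =====
-- def find_positions(layers):
--     start = (0, 0)
--     end = None
--     for y, row in enumerate(layers["end"]):
--         for x, tile in enumerate(row):
--             if tile != 0:
--                 end = (x, y)
--     return start, end
-- ===== SOURCE B (Python) =====
-- def find_positions(layers):
--     for y, row in reversed(list(enumerate(layers["end"]))):
--         for x in range(len(row) - 1, -1, -1):
--             if row[x] != 0:
--                 return (0, 0), (x, y)
--     return (0, 0), None
-- ===== Notes on version B (the rewrite author's own statement) =====
-- stated objective: alternative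
-- what changed: B scans the grid backwards (rows and tiles in reverse) and returns at the FIRST nonzero tile, instead of A's full forward sweep that keeps overwriting the last nonzero position.
import Mathlib
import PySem

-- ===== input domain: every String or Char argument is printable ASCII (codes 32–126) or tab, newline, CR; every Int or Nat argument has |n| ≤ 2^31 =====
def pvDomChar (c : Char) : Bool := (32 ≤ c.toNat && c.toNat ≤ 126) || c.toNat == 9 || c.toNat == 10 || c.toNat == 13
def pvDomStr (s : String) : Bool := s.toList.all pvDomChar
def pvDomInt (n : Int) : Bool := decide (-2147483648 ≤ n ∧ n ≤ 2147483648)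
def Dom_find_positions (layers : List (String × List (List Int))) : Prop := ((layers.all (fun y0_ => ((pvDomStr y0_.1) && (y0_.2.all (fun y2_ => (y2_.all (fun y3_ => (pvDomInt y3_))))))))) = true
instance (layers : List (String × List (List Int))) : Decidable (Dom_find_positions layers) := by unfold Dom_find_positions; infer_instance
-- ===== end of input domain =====

-- B scans the grid backwards and returns at the first nonzero tile, instead of A's
-- forward sweep that overwrites the last nonzero position; same return value.
-- ===== PORT A =====
def find_positions (layers : List (String × List (List Int))) : (Int × Int) × (Option (Int × Int)) :=
  let grid := (layers.lookup "end").getD []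
  let e :=
    (PySem.List.enumerate grid).foldl
      (fun acc yrow =>
        (PySem.List.enumerate yrow.2).foldl
          (fun acc2 xt => if xt.2 ≠ 0 then some (xt.1, yrow.1) else acc2) acc)
      none
  ((0, 0), e)

-- ===== PORT B =====
-- inner reversed loop of Source B: tiles of one row (with original x indices), back to front
def pvRowScan (y : Int) : List (Int × Int) → Option (Int × Int)
  | [] => none
  | (x, t) :: rest => if t ≠ 0 then some (x, y) else pvRowScan y rest

-- outer reversed loop of Source B: rows (with original y indices), bottom to top
def pvRowsScan : List (Int × List Int) → Option (Int × Int)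
  | [] => none
  | (y, row) :: rest =>
    match pvRowScan y (PySem.List.enumerate row).reverse with
    | some r => some r
    | none => pvRowsScan rest

def find_positions_alt (layers : List (String × List (List Int))) : (Int × Int) × (Option (Int × Int)) :=
  let grid := (layers.lookup "end").getD []
  ((0, 0), pvRowsScan (PySem.List.enumerate grid).reverse)

-- ===== PRECONDITION & SPEC =====
-- Pre_ excludes inputs without an "end" key, on which both Pythons raise KeyError.
def Pre_find_positions (layers : List (String × List (List Int))) : Prop :=
  (layers.lookup "end").isSome = true
instance (layers : List (String × List (List Int))) : Decidable (Pre_find_positions layers) := by unfold Pre_find_positions; infer_instance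
def pvWitness_find_positions : (List (String × List (List Int))) := [("end", [[0, 3], [0, 0]])]
def Spec_find_positions (layers : List (String × List (List Int))) (out : (Int × Int) × (Option (Int × Int))) : Prop := out = find_positions_alt layers
instance (layers : List (String × List (List Int))) (out : (Int × Int) × (Option (Int × Int))) : Decidable (Spec_find_positions layers out) := by unfold Spec_find_positions; infer_instance

-- ===== CLAIM (what is proved, stated in full; the proofs are below) =====
def Claim_equal_find_positions : Prop := ∀ (layers : List (String × List (List Int))), Dom_find_positions layers → Pre_find_positions layers → Spec_find_positions layers (find_positions layers)

-- ===== LEMMAS AND PROOFS =====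

theorem pvRowScan_append (y : Int) (u v : List (Int × Int)) :
    pvRowScan y (u ++ v) =
      match pvRowScan y u with
      | some r => some r
      | none => pvRowScan y v := by
  induction u with
  | nil => simp [pvRowScan]
  | cons a t ih =>
    obtain ⟨x, tl⟩ := a
    simp only [List.cons_append, pvRowScan]
    split_ifs <;> simp [ih]

theorem pvRowsScan_append (u v : List (Int × List Int)) :
    pvRowsScan (u ++ v) =
      match pvRowsScan u with
      | some r => some r
      | none => pvRowsScan v := by
  induction u with
  | nil => simp [pvRowsScan]
  | cons a t ih =>
    obtain ⟨y, row⟩ := a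
    simp only [List.cons_append, pvRowsScan]
    cases pvRowScan y (PySem.List.enumerate row).reverse <;> simp [ih]

theorem inner_loop_eq (y : Int) (l : List (Int × Int)) :
    ∀ acc : Option (Int × Int),
      l.foldl (fun acc2 xt => if xt.2 ≠ 0 then some (xt.1, y) else acc2) acc =
        match pvRowScan y l.reverse with
        | some r => some r
        | none => acc := by
  induction l with
  | nil => intro acc; simp [pvRowScan]
  | cons a t ih =>
    intro acc
    simp only [List.foldl_cons, List.reverse_cons, pvRowScan_append, ih]
    cases pvRowScan y t.reverse with
    | some r => rfl
    | none =>
      obtain ⟨x, tl⟩ := a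
      simp only [pvRowScan]
      split_ifs <;> rfl

theorem outer_loop_eq (l : List (Int × List Int)) :
    ∀ acc : Option (Int × Int),
      l.foldl
          (fun acc yrow =>
            (PySem.List.enumerate yrow.2).foldl
              (fun acc2 xt => if xt.2 ≠ 0 then some (xt.1, yrow.1) else acc2) acc)
          acc =
        match pvRowsScan l.reverse with
        | some r => some r
        | none => acc := by
  induction l with
  | nil => intro acc; simp [pvRowsScan]
  | cons a t ih =>
    intro acc
    obtain ⟨y, row⟩ := a
    rw [List.foldl_cons, ih, List.reverse_cons, pvRowsScan_append]
    cases pvRowsScan t.reverse with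
    | some r => rfl
    | none =>
      simp only [pvRowsScan, inner_loop_eq]
      cases pvRowScan y (PySem.List.enumerate row).reverse <;> rfl

-- ===== VERDICT (by name: the statement is the Claim_ definition above) =====
theorem find_positions_spec : Claim_equal_find_positions := by
  intro layers _ _
  unfold Spec_find_positions find_positions find_positions_alt
  simp only [outer_loop_eq]
  cases pvRowsScan (PySem.List.enumerate ((layers.lookup "end").getD [])).reverse <;> rfl
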